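-- pv_equiv track=rewrite | github.com/Nandynamic/Projects-and-Interview-Question-Hacktoberfest2025 | Score of Good Pairs (Hard).py | findScoreSum
-- ===== SOURCE A (Python) =====
-- def findScoreSum(nums):
--     count = {}
--     sum_idx = {}
--     total = 0
--     n = len(nums)
--
--     for j in range(n):
--         val = nums[j]
--         if val in count:
--             total += j * count[val] - sum_idx[val]
--             count[val] += 1
--             sum_idx[val] += j
--         else:
--             count[val] = 1
--             sum_idx[val] = j
--     return total
-- ===== SOURCE B (Python) =====
-- def findScoreSum(nums):
--     # Two-phase: group indices by value, then sum each group's pairwise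
--     # index distances with a running prefix sum.
--     groups = {}
--     for j, val in enumerate(nums):
--         groups.setdefault(val, []).append(j)
--     total = 0
--     for idxs in groups.values():
--         prefix = 0
--         cnt = 0
--         for idx in idxs:
--             total += idx * cnt - prefix
--             prefix += idx
--             cnt += 1
--     return total
-- ===== Notes on version B (the rewrite author's own statement) =====
-- stated objective: alternative
-- what changed: Replaces A's single interleaved pass with two count/sum dicts by a two-phase group-then-process: first build value -> index-list groups, then accumulate each group's internal sum of pairwise distances via a running prefix sum.
import Mathlib
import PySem

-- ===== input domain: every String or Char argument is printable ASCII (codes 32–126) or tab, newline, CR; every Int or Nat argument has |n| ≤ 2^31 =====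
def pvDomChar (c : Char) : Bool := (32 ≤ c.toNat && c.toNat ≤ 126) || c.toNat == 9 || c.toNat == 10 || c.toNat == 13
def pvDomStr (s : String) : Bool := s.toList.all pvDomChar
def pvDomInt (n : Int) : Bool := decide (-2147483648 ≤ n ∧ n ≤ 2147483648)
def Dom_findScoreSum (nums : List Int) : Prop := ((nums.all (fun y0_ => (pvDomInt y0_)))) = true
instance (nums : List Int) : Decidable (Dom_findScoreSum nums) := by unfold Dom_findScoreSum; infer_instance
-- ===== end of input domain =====

-- B replaces A's single interleaved pass (count/sum dicts) by a two-phase group-then-process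
-- decomposition (group indices by value, then per-group prefix-sum accumulation); objective: alternative.

-- ===== PORT A =====
-- A-side helper: the body of A's loop, one step on the state (count, sum_idx, total) for (j, val).
-- (count[val] / sum_idx[val] are read only under the 'val in count' branch, where getD _ 0 is exact.)
def AStep (st : PySem.Dict Int Int × PySem.Dict Int Int × Int) (p : Int × Int) :
    PySem.Dict Int Int × PySem.Dict Int Int × Int :=
  match st with
  | (count, sum_idx, total) =>
    if count.contains p.2 then
      (count.modify p.2 0 (· + 1), sum_idx.modify p.2 0 (· + p.1),
       total + (p.1 * count.getD p.2 0 - sum_idx.getD p.2 0))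
    else
      (count.insert p.2 1, sum_idx.insert p.2 p.1, total)

def findScoreSum (nums : List Int) : Int :=
  ((PySem.List.pyRange 0 (nums.length : Int) 1).foldl
    (fun st j => AStep st (j, PySem.List.pyGetD nums j 0))
    (PySem.Dict.empty, PySem.Dict.empty, 0)).2.2

-- ===== PORT B =====
-- B-side helpers: the group-building step and the inner prefix-sum step on (prefix, cnt, total).
def GStep (g : PySem.Dict Int (List Int)) (p : Int × Int) : PySem.Dict Int (List Int) :=
  g.modify p.2 [] (· ++ [p.1])

def innerStep (s : Int × Int × Int) (idx : Int) : Int × Int × Int :=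
  (s.1 + idx, s.2.1 + 1, s.2.2 + (idx * s.2.1 - s.1))

def findScoreSum_alt (nums : List Int) : Int :=
  let groups := (PySem.List.enumerate nums).foldl GStep PySem.Dict.empty
  groups.values.foldl (fun total idxs => (idxs.foldl innerStep (0, 0, total)).2.2) 0

-- ===== PRECONDITION & SPEC =====
def Spec_findScoreSum (nums : List Int) (out : Int) : Prop := out = findScoreSum_alt nums
instance (nums : List Int) (out : Int) : Decidable (Spec_findScoreSum nums out) := by unfold Spec_findScoreSum; infer_instance

-- ===== CLAIM (what is proved, stated in full; the proofs are below) =====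
def Claim_equal_findScoreSum : Prop := ∀ (nums : List Int), Dom_findScoreSum nums → Spec_findScoreSum nums (findScoreSum nums)

-- ===== LEMMAS AND PROOFS =====

-- the sum of the indices at which x occurs (A keeps it in sum_idx; it is a B-group's running sum)
def Fsum (nums : List Int) (x : Int) : Int :=
  (((PySem.List.enumerate nums).filter (fun p => p.2 == x)).map (·.1)).sum

theorem foldl_range_enum {σ : Type} (xs : List Int) (f : σ → Int × Int → σ) (init : σ) :
    (PySem.List.pyRange 0 (xs.length : Int) 1).foldl
      (fun acc j => f acc (j, PySem.List.pyGetD xs j 0)) init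
    = (PySem.List.enumerate xs).foldl f init := by
  induction xs using List.reverseRecOn with
  | nil => simp [PySem.List.pyRange_one_eq_nil, PySem.List.enumerate_nil]
  | append_singleton ys y ih =>
    have hlen : (((ys ++ [y]).length : Nat) : Int) = (ys.length : Int) + 1 := by simp
    rw [hlen, PySem.List.pyRange_one_succ_right (by positivity), List.foldl_append]
    rw [PySem.List.foldl_congr_mem _ _ (fun acc j => f acc (j, PySem.List.pyGetD ys j 0)) init ?_]
    · rw [ih, PySem.List.enumerate_append, List.foldl_append]
      simp only [PySem.List.enumerate_cons, PySem.List.enumerate_nil, List.foldl_cons,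
        List.foldl_nil, zero_add]
      congr 2
      simp [PySem.List.pyGetD_natCast]
    · intro acc j hj
      rw [PySem.List.mem_pyRange_one] at hj
      have h1 : j < ((ys ++ [y]).length : Int) := by simp; omega
      show f acc (j, PySem.List.pyGetD (ys ++ [y]) j 0) = f acc (j, PySem.List.pyGetD ys j 0)
      rw [PySem.List.pyGetD_eq_getElem _ 0 hj.1 h1,
          PySem.List.pyGetD_eq_getElem (xs := ys) _ hj.1 hj.2]
      congr 2
      exact List.getElem_append_left (by omega)


theorem AStep_contains_fst (st : PySem.Dict Int Int × PySem.Dict Int Int × Int) (p : Int × Int) (x : Int) :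
    (AStep st p).1.contains x = ((x == p.2) || st.1.contains x) := by
  obtain ⟨c, s, t⟩ := st
  by_cases h : c.contains p.2 <;>
    simp [AStep, h, PySem.Dict.contains_modify, PySem.Dict.contains_insert]

theorem AStep_contains_snd (st : PySem.Dict Int Int × PySem.Dict Int Int × Int) (p : Int × Int) (x : Int) :
    (AStep st p).2.1.contains x = ((x == p.2) || st.2.1.contains x) := by
  obtain ⟨c, s, t⟩ := st
  by_cases h : c.contains p.2 <;>
    simp [AStep, h, PySem.Dict.contains_modify, PySem.Dict.contains_insert]

theorem AStep_count_getD (st : PySem.Dict Int Int × PySem.Dict Int Int × Int) (p : Int × Int) (x : Int) :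
    (AStep st p).1.getD x 0 = st.1.getD x 0 + (if x = p.2 then 1 else 0) := by
  obtain ⟨c, s, t⟩ := st
  by_cases h : c.contains p.2
  · simp [AStep, h, PySem.Dict.getD_modify]
    split_ifs with hx <;> [skip; ring]
    subst hx; ring
  · simp only [Bool.not_eq_true] at h
    simp [AStep, h, PySem.Dict.getD_insert]
    split_ifs with hx
    · subst hx; rw [PySem.Dict.getD_of_not_contains _ _ h]; ring
    · ring
theorem AStep_sum_getD (st : PySem.Dict Int Int × PySem.Dict Int Int × Int) (p : Int × Int) (x : Int)
    (hcs : st.2.1.contains p.2 = st.1.contains p.2) :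
    (AStep st p).2.1.getD x 0 = st.2.1.getD x 0 + (if x = p.2 then p.1 else 0) := by
  obtain ⟨c, s, t⟩ := st
  by_cases h : c.contains p.2
  · simp [AStep, h, PySem.Dict.getD_modify]
    split_ifs with hx <;> [skip; ring]
    subst hx; ring
  · simp only [Bool.not_eq_true] at h
    have hs : s.contains p.2 = false := by rw [hcs]; exact h
    simp [AStep, h, PySem.Dict.getD_insert]
    split_ifs with hx
    · subst hx; rw [PySem.Dict.getD_of_not_contains _ _ hs]; ring
    · ring

theorem Afold_contains_fst (ps : List (Int × Int)) (st : PySem.Dict Int Int × PySem.Dict Int Int × Int) (x : Int) :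
    (ps.foldl AStep st).1.contains x = (st.1.contains x || decide (x ∈ ps.map (·.2))) := by
  induction ps generalizing st with
  | nil => simp
  | cons p ps ih =>
    rw [List.foldl_cons, ih, AStep_contains_fst]
    by_cases hx : x = p.2
    · simp [hx, List.mem_cons]
    · simp only [show (x == p.2) = false from by simp [hx], Bool.false_or]
      by_cases hm : x ∈ List.map (fun x => x.2) ps <;> simp [hm, List.mem_cons, hx]

theorem Afold_count_getD (ps : List (Int × Int)) (st : PySem.Dict Int Int × PySem.Dict Int Int × Int) (x : Int) :
    (ps.foldl AStep st).1.getD x 0 = st.1.getD x 0 + ((ps.map (·.2)).count x : Int) := by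
  induction ps generalizing st with
  | nil => simp
  | cons p ps ih =>
    rw [List.foldl_cons, ih, AStep_count_getD]
    by_cases hx : x = p.2
    · simp [hx]; ring
    · simp [hx, Ne.symm hx]

theorem Afold_sum_getD (ps : List (Int × Int)) (st : PySem.Dict Int Int × PySem.Dict Int Int × Int) (x : Int)
    (hcs : ∀ k, st.2.1.contains k = st.1.contains k) :
    (ps.foldl AStep st).2.1.getD x 0
      = st.2.1.getD x 0 + ((ps.filter (fun p => p.2 == x)).map (·.1)).sum := by
  induction ps generalizing st with
  | nil => simp
  | cons p ps ih =>
    rw [List.foldl_cons, ih _ (by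
      intro k
      rw [AStep_contains_fst, AStep_contains_snd, hcs k]),
      AStep_sum_getD _ _ _ (hcs p.2)]
    by_cases hx : p.2 = x
    · simp [hx]; ring
    · simp [hx, Ne.symm hx]


theorem A_enum (nums : List Int) :
    findScoreSum nums
      = ((PySem.List.enumerate nums).foldl AStep (PySem.Dict.empty, PySem.Dict.empty, 0)).2.2 := by
  unfold findScoreSum
  rw [foldl_range_enum]

theorem A_append (nums : List Int) (x : Int) :
    findScoreSum (nums ++ [x])
      = findScoreSum nums
        + (if x ∈ nums then (nums.length : Int) * (nums.count x : Int) - Fsum nums x else 0) := by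
  rw [A_enum, A_enum, PySem.List.enumerate_append, List.foldl_append]
  simp only [PySem.List.enumerate_cons, PySem.List.enumerate_nil, List.foldl_cons,
    List.foldl_nil, zero_add]
  have hcont : ((PySem.List.enumerate nums).foldl AStep
      (PySem.Dict.empty, PySem.Dict.empty, 0)).1.contains x = decide (x ∈ nums) := by
    rw [Afold_contains_fst]
    simp [PySem.List.map_snd_enumerate]
  by_cases hx : x ∈ nums
  · have hc : ((PySem.List.enumerate nums).foldl AStep
        (PySem.Dict.empty, PySem.Dict.empty, 0)).1.contains x = true := by
      rw [hcont]; simpa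
    simp only [AStep, hc, if_true]
    rw [if_pos hx, Afold_count_getD, Afold_sum_getD _ _ _ (fun k => rfl)]
    simp [PySem.List.map_snd_enumerate, PySem.Dict.getD_empty, Fsum]
  · have hc : ((PySem.List.enumerate nums).foldl AStep
        (PySem.Dict.empty, PySem.Dict.empty, 0)).1.contains x = false := by
      rw [hcont]; simpa
    simp [AStep, hc, hx]

theorem inner_fst (l : List Int) (p c t : Int) : (l.foldl innerStep (p, c, t)).1 = p + l.sum := by
  induction l generalizing p c t with
  | nil => simp
  | cons a l ih => simp [innerStep, ih]; ring
theorem inner_snd (l : List Int) (p c t : Int) :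
    (l.foldl innerStep (p, c, t)).2.1 = c + (l.length : Int) := by
  induction l generalizing p c t with
  | nil => simp
  | cons a l ih => simp [innerStep, ih]; ring
theorem inner_total_shift (l : List Int) (p c t : Int) :
    (l.foldl innerStep (p, c, t)).2.2 = t + (l.foldl innerStep (p, c, 0)).2.2 := by
  induction l generalizing p c t with
  | nil => simp
  | cons a l ih =>
    simp only [List.foldl_cons, innerStep]
    rw [ih, ih (p + a) (c + 1) (0 + (a * c - p))]
    ring
def inner0 (l : List Int) : Int := (l.foldl innerStep (0, 0, 0)).2.2
theorem inner0_append (l : List Int) (n : Int) :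
    inner0 (l ++ [n]) = inner0 l + (n * (l.length : Int) - l.sum) := by
  unfold inner0
  rw [List.foldl_append]
  simp only [List.foldl_cons, List.foldl_nil, innerStep]
  rw [inner_fst, inner_snd]
  ring_nf

def Bgroups (nums : List Int) : PySem.Dict Int (List Int) :=
  (PySem.List.enumerate nums).foldl GStep PySem.Dict.empty

theorem Bgroups_swap (nums : List Int) :
    Bgroups nums = (((PySem.List.enumerate nums).map Prod.swap).foldl
      (fun d p => d.modify p.1 [] (fun v => v ++ [p.2])) PySem.Dict.empty) := by
  rw [List.foldl_map]
  rfl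

theorem Bgroups_getD (nums : List Int) (x : Int) :
    (Bgroups nums).getD x []
      = ((PySem.List.enumerate nums).filter (fun p => p.2 == x)).map (·.1) := by
  rw [Bgroups_swap, PySem.Dict.getD_foldl_modify_append]
  simp [List.filter_map, List.map_map, Function.comp_def, Prod.swap]

theorem Bgroups_keys (nums : List Int) : (Bgroups nums).keys = PySem.Set.ofList nums := by
  unfold Bgroups
  have h := PySem.Dict.keys_foldl_modify_key (PySem.List.enumerate nums) (fun p => p.2)
    ([] : List Int) (fun _ p v => v ++ [p.1]) PySem.Dict.empty
  rw [show (fun (d : PySem.Dict Int (List Int)) (x : Int × Int) => d.modify x.2 [] fun v => v ++ [x.1]) = GStep from rfl] at h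
  rw [h]
  simp [PySem.List.map_snd_enumerate, PySem.Set.update_nil_left, PySem.Dict.keys_empty]

theorem Bgroups_keys_nodup (nums : List Int) : (Bgroups nums).keys.Nodup := by
  unfold Bgroups
  have h := PySem.Dict.nodup_keys_foldl_modify_key (PySem.List.enumerate nums) (fun p => p.2)
    ([] : List Int) (fun _ p v => v ++ [p.1]) PySem.Dict.empty (by simp [PySem.Dict.keys_empty])
  exact h

theorem Btotal_eq_sum (L : List (List Int)) (a : Int) :
    L.foldl (fun total idxs => (idxs.foldl innerStep (0, 0, total)).2.2) a
      = a + (L.map inner0).sum := by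
  rw [PySem.List.foldl_congr_mem L _ (fun acc x => acc + inner0 x) a
    (by intro acc x _; rw [inner_total_shift]; rfl)]
  exact PySem.List.foldl_add L inner0 a

theorem B_eq_sum_keys (nums : List Int) :
    findScoreSum_alt nums
      = ((Bgroups nums).keys.map (fun k => inner0 ((Bgroups nums).getD k []))).sum := by
  show ((Bgroups nums).values.foldl (fun total idxs => (idxs.foldl innerStep (0, 0, total)).2.2) 0)
    = _
  rw [Btotal_eq_sum, PySem.Dict.values_eq_map_keys _ (Bgroups_keys_nodup nums) ([] : List Int),
    List.map_map]
  simp [Function.comp_def]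

theorem sum_map_update (ks : List Int) (f f' : Int → Int) (x : Int)
    (hx : x ∈ ks) (hnd : ks.Nodup) (hne : ∀ k, k ≠ x → f' k = f k) :
    (ks.map f').sum = (ks.map f).sum + (f' x - f x) := by
  induction ks with
  | nil => cases hx
  | cons k ks ih =>
    simp only [List.map_cons, List.sum_cons]
    rcases List.mem_cons.mp hx with h | h
    · subst h
      have hrest : ks.map f' = ks.map f :=
        List.map_congr_left (fun a ha => hne a (fun e => (List.nodup_cons.mp hnd).1 (e ▸ ha)))
      rw [hrest]; ring
    · have hk : k ≠ x := fun e => (List.nodup_cons.mp hnd).1 (e ▸ h)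
      rw [hne k hk, ih h (List.nodup_cons.mp hnd).2]; ring

theorem Bgroups_append (nums : List Int) (x : Int) :
    Bgroups (nums ++ [x]) = (Bgroups nums).modify x [] (· ++ [(nums.length : Int)]) := by
  unfold Bgroups
  rw [PySem.List.enumerate_append, List.foldl_append]
  simp [PySem.List.enumerate_cons, PySem.List.enumerate_nil, GStep]

theorem B_append (nums : List Int) (x : Int) :
    findScoreSum_alt (nums ++ [x])
      = findScoreSum_alt nums
        + (if x ∈ nums then (nums.length : Int) * (nums.count x : Int) - Fsum nums x else 0) := by
  rw [B_eq_sum_keys, B_eq_sum_keys, Bgroups_append]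
  have hcount : nums.count x = List.countP (fun p => p.2 == x) (PySem.List.enumerate nums) := by
    conv_lhs => rw [← PySem.List.map_snd_enumerate nums 0]
    rw [List.count_eq_countP, List.countP_map]
    rfl
  have hlen : ((((Bgroups nums).getD x []).length : Nat) : Int) = (nums.count x : Int) := by
    rw [Bgroups_getD, List.length_map, ← List.countP_eq_length_filter, hcount]
  have hsum : ((Bgroups nums).getD x []).sum = Fsum nums x := by
    rw [Bgroups_getD]; rfl
  by_cases hx : x ∈ nums
  · have hc : (Bgroups nums).contains x = true := by
      rw [PySem.Dict.contains_iff_mem_keys, Bgroups_keys]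
      exact (PySem.Set.mem_ofList nums x).mpr hx
    have hkeys : ((Bgroups nums).modify x [] (· ++ [(nums.length : Int)])).keys
        = (Bgroups nums).keys := by
      rw [PySem.Dict.keys_modify, PySem.Dict.keys_insert_of_contains _ _ hc]
    rw [hkeys]
    rw [sum_map_update ((Bgroups nums).keys)
      (fun k => inner0 ((Bgroups nums).getD k []))
      (fun k => inner0 (((Bgroups nums).modify x [] (· ++ [(nums.length : Int)])).getD k []))
      x
      (by rw [Bgroups_keys]; exact (PySem.Set.mem_ofList nums x).mpr hx)
      (Bgroups_keys_nodup nums)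
      (by
        intro k hk
        beta_reduce
        rw [PySem.Dict.getD_modify, if_neg hk])]
    rw [PySem.Dict.getD_modify, if_pos rfl, inner0_append, hlen, hsum, if_pos hx]
    ring
  · have hc : (Bgroups nums).contains x = false := by
      rw [← Bool.not_eq_true, PySem.Dict.contains_iff_mem_keys, Bgroups_keys]
      intro hmem
      exact hx ((PySem.Set.mem_ofList nums x).mp hmem)
    have hkeys : ((Bgroups nums).modify x [] (· ++ [(nums.length : Int)])).keys
        = (Bgroups nums).keys ++ [x] := by
      rw [PySem.Dict.keys_modify, PySem.Dict.keys_insert_of_not_contains _ _ hc]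
    rw [hkeys, List.map_append, List.sum_append]
    have hrest : ((Bgroups nums).keys.map
        (fun k => inner0 (((Bgroups nums).modify x [] (· ++ [(nums.length : Int)])).getD k [])))
        = ((Bgroups nums).keys.map (fun k => inner0 ((Bgroups nums).getD k []))) := by
      apply List.map_congr_left
      intro k hk
      have hkx : k ≠ x := by
        intro e
        rw [Bgroups_keys] at hk
        exact hx (e ▸ (PySem.Set.mem_ofList nums k).mp hk)
      rw [PySem.Dict.getD_modify, if_neg hkx]
    rw [hrest]
    simp only [hx, if_false, add_zero, List.map_cons, List.map_nil, List.sum_cons,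
      List.sum_nil]
    rw [PySem.Dict.getD_modify, if_pos rfl, PySem.Dict.getD_of_not_contains _ _ hc]
    simp [inner0, innerStep]

theorem main_eq (nums : List Int) : findScoreSum nums = findScoreSum_alt nums := by
  induction nums using List.reverseRecOn with
  | nil => rfl
  | append_singleton ys y ih => rw [A_append, B_append, ih]

-- ===== VERDICT (by name: the statement is the Claim_ definition above) =====
theorem findScoreSum_spec : Claim_equal_findScoreSum := by
  intro nums _
  unfold Spec_findScoreSum
  exact main_eq nums
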